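-- pv_equiv track=rewrite | github.com/seungwookc97/Algorithm | 프로그래머스/2/12923. 숫자 블록/숫자 블록.py | solution
-- ===== SOURCE A (Python) =====
-- def solution(begin, end):
--     answer = [0]*(end-begin+1)
--
--     for i in range(1, 10000001):
--         if i * 2 > end:
--             break
--
--         start = max(i * 2, begin)
--
--         if start > end:
--             continue
--
--         start = ((start + i - 1) // i) * i
--
--         pos = start
--         while pos <= end:
--             answer[pos - begin] = i
--             pos += i
--
--     return answer
-- ===== SOURCE B (Python) =====
-- def _best(p, cap=10000000):
--     # largest divisor d of p with 2*d <= p and d <= cap, else 0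
--     if p < 2:
--         return 0
--     best = 1
--     k = 2
--     while k * k <= p:
--         if p % k == 0:
--             q = p // k
--             if q <= cap:
--                 return q
--             best = k
--         k += 1
--     return best
--
-- def solution(begin, end):
--     res = []
--     for p in range(begin, end + 1):
--         res.append(_best(p))
--     return res
-- ===== Notes on version B (the rewrite author's own statement) =====
-- stated objective: alternative
-- what changed: A fills the whole window with a global sieve, iterating every stamp i = 1..min(10^7, end//2) and overwriting each multiple of i in [begin, end]; B instead computes each position's answer independently by trial division up to sqrt(p) (the first factor's cofactor is the largest proper divisor, falling back to the largest divisor <= 10^7 when the cofactor exceeds the cap).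
import Mathlib
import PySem

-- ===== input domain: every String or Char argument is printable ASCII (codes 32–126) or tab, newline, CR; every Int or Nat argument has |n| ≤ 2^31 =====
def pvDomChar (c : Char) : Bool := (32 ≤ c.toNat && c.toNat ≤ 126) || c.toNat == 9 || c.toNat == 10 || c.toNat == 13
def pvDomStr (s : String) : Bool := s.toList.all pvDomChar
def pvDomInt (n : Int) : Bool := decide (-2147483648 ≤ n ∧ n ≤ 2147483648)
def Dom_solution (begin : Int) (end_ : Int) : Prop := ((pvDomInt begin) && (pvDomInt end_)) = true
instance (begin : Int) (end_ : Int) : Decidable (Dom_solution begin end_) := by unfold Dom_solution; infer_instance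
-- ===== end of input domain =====

-- B replaces A's global multiples-sieve (stamp i on every multiple of i, for i = 1..min(1e7, end//2))
-- by an independent per-position trial division up to √p: a different algorithm (objective: alternative).

-- ===== PORT A =====
-- inner 'while pos <= end: answer[pos - begin] = i; pos += i'
-- (the '1 ≤ i' conjunct is a totality guard only: every call site has i ≥ 1)
def markA (begin end_ i pos : Int) (ans : List Int) : List Int :=
  if h : pos ≤ end_ ∧ 1 ≤ i then
    markA begin end_ i (pos + i) (PySem.List.pySetD ans (pos - begin) i)
  else ans
termination_by (end_ + 1 - pos).toNat
decreasing_by omega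

-- 'for i in range(1, 10000001)' with its break/continue, as a counting recursion
def loopA (begin end_ i : Int) (ans : List Int) : List Int :=
  if _h : i ≤ 10000000 then
    if i * 2 > end_ then ans
    else if max (i * 2) begin > end_ then loopA begin end_ (i + 1) ans
    else loopA begin end_ (i + 1)
      (markA begin end_ i (PySem.Int.floordiv (max (i * 2) begin + i - 1) i * i) ans)
  else ans
termination_by (10000001 - i).toNat
decreasing_by all_goals omega

def solution (begin : Int) (end_ : Int) : List Int :=
  loopA begin end_ 1 (List.replicate (end_ - begin + 1).toNat 0)

-- ===== PORT B =====
-- trial division k = 2,3,… while k*k ≤ p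
-- (the '2 ≤ k' conjunct is a totality guard only: every call site has k ≥ 2)
def bestLoop (p k best : Int) : Int :=
  if h : k * k ≤ p ∧ 2 ≤ k then
    if PySem.Int.mod p k = 0 then
      if PySem.Int.floordiv p k ≤ 10000000 then PySem.Int.floordiv p k
      else bestLoop p (k + 1) k
    else bestLoop p (k + 1) best
  else best
termination_by (p - k).toNat
decreasing_by all_goals
  · have h2 : 2 * k ≤ k * k := by nlinarith [h.1, h.2]
    omega

def bestDiv (p : Int) : Int := if p < 2 then 0 else bestLoop p 2 1

def solution_alt (begin : Int) (end_ : Int) : List Int :=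
  (PySem.List.pyRange begin (end_ + 1) 1).map bestDiv

-- ===== PRECONDITION & SPEC =====
def Spec_solution (begin : Int) (end_ : Int) (out : List Int) : Prop := out = solution_alt begin end_
instance (begin : Int) (end_ : Int) (out : List Int) : Decidable (Spec_solution begin end_ out) := by unfold Spec_solution; infer_instance

-- ===== CLAIM (what is proved, stated in full; the proofs are below) =====
def Claim_equal_solution : Prop := ∀ (begin : Int) (end_ : Int), Dom_solution begin end_ → Spec_solution begin end_ (solution begin end_)

-- ===== LEMMAS AND PROOFS =====
lemma markA_length (begin end_ i pos : Int) (ans : List Int) :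
    (markA begin end_ i pos ans).length = ans.length := by
  fun_induction markA with
  | case1 pos ans h ih => rw [ih]; simp [PySem.List.length_pySetD]
  | case2 => rfl

lemma markA_getD (begin end_ i pos : Int) (ans : List Int) (hi : 1 ≤ i) (hpb : begin ≤ pos)
    (j : ℕ) (hj : j < ans.length) :
    (markA begin end_ i pos ans).getD j 0 =
      if pos ≤ begin + (j : Int) ∧ begin + (j : Int) ≤ end_ ∧ i ∣ (begin + (j : Int) - pos)
      then i else ans.getD j 0 := by
  fun_induction markA with
  | case1 pos ans h ih =>
    have hpb' : begin ≤ pos + i := by omega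
    have hlen : (PySem.List.pySetD ans (pos - begin) i).length = ans.length := by
      simp [PySem.List.length_pySetD]
    rw [ih hpb' (by rwa [hlen])]
    have hset : PySem.List.pySetD ans (pos - begin) i = ans.set (pos - begin).toNat i :=
      by apply PySem.List.pySetD_of_nonneg; omega
    rw [hset]
    by_cases hP : pos ≤ begin + (j : Int) ∧ begin + (j : Int) ≤ end_ ∧ i ∣ (begin + (j : Int) - pos)
    · obtain ⟨h1, h2, h3⟩ := hP
      by_cases hge : pos + i ≤ begin + (j : Int)
      · rw [if_pos ⟨hge, h2, by
          have : begin + (j:Int) - (pos + i) = (begin + (j:Int) - pos) - i := by ring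
          rw [this]; exact dvd_sub h3 (dvd_refl i)⟩]
        rw [if_pos ⟨h1, h2, h3⟩]
      · -- b + j = pos
        have heq : begin + (j : Int) = pos := by
          obtain ⟨c, hc⟩ := h3
          have hnn : 0 ≤ begin + (j:Int) - pos := by omega
          have hlt : begin + (j:Int) - pos < i := by omega
          have hc0 : c = 0 := by
            by_contra hne
            rcases lt_or_gt_of_ne hne with hlt'|hgt
            · have : i * c ≤ -i := by nlinarith
              omega
            · have : i ≤ i * c := by nlinarith
              omega
          subst hc0
          simp at hc
          omega
        rw [if_neg (by omega)]
        rw [if_pos ⟨h1, h2, h3⟩]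
        have hidx : (pos - begin).toNat = j := by omega
        rw [List.getD_eq_getElem _ _ (by simpa [hlen] using hj)]
        rw [hidx]
        simp [List.getElem_set, hj]
    · rw [if_neg (by
        intro ⟨h1, h2, h3⟩
        exact hP ⟨by omega, h2, by
          have : begin + (j:Int) - pos = (begin + (j:Int) - (pos + i)) + i := by ring
          rw [this]; exact dvd_add h3 (dvd_refl i)⟩)]
      rw [if_neg hP]
      -- untouched index: (pos - begin).toNat ≠ j
      have hne : (pos - begin).toNat ≠ j := by
        intro hEq
        have : begin + (j : Int) = pos := by omega
        exact hP ⟨by omega, by omega, by simp [this]⟩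
      rw [List.getD_eq_getElem _ _ (by simpa [hlen] using hj),
          List.getD_eq_getElem _ _ hj]
      simp [List.getElem_set, hne]
  | case2 pos ans h =>
    rw [if_neg (by intro ⟨h1, h2, _⟩; omega)]

def markerSet (i : ℕ) (p : Int) : Finset ℕ :=
  (Finset.Icc i 10000000).filter (fun d => 0 < d ∧ (d : Int) ∣ p ∧ 2 * (d : Int) ≤ p)

lemma mem_markerSet {i d : ℕ} {p : Int} :
    d ∈ markerSet i p ↔ i ≤ d ∧ d ≤ 10000000 ∧ 0 < d ∧ (d : Int) ∣ p ∧ 2 * (d : Int) ≤ p := by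
  simp [markerSet, Finset.mem_Icc, and_assoc]

lemma markerSet_subset (n : ℕ) (p : Int) : markerSet (n + 1) p ⊆ markerSet n p := by
  intro d hd
  rw [mem_markerSet] at hd ⊢
  exact ⟨by omega, hd.2.1, hd.2.2.1, hd.2.2.2⟩

lemma markerSet_sup_succ (n : ℕ) (p : Int) (h : (markerSet (n + 1) p).Nonempty) :
    (markerSet n p).sup id = (markerSet (n + 1) p).sup id := by
  apply le_antisymm
  · apply Finset.sup_le
    intro d hd
    rw [mem_markerSet] at hd
    by_cases hdn : n + 1 ≤ d
    · exact Finset.le_sup (f := id) (mem_markerSet.mpr ⟨hdn, hd.2.1, hd.2.2.1, hd.2.2.2.1, hd.2.2.2.2⟩)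
    · obtain ⟨m, hm⟩ := h
      have hle := Finset.le_sup (f := id) hm
      rw [mem_markerSet] at hm
      simp only [id] at hle ⊢
      omega
  · exact Finset.sup_mono (markerSet_subset n p)

lemma markerSet_eq_succ (n : ℕ) (p : Int) (hn : ¬(0 < n ∧ (n : Int) ∣ p ∧ 2 * (n : Int) ≤ p)) :
    markerSet n p = markerSet (n + 1) p := by
  ext d
  rw [mem_markerSet, mem_markerSet]
  constructor
  · rintro ⟨h1, h2, h3, h4, h5⟩
    refine ⟨?_, h2, h3, h4, h5⟩
    rcases Nat.eq_or_lt_of_le h1 with hEq | hLt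
    · exact absurd (hEq ▸ ⟨h3, h4, h5⟩) hn
    · omega
  · rintro ⟨h1, h2, h3, h4, h5⟩
    exact ⟨by omega, h2, h3, h4, h5⟩

lemma markerSet_singleton (n : ℕ) (p : Int) (h0 : 0 < n) (hc : n ≤ 10000000)
    (hd : (n : Int) ∣ p) (h2 : 2 * (n : Int) ≤ p) (he : markerSet (n + 1) p = ∅) :
    markerSet n p = {n} := by
  ext d
  rw [mem_markerSet, Finset.mem_singleton]
  constructor
  · rintro ⟨h1, h2', h3, h4, h5⟩
    by_contra hne
    have : d ∈ markerSet (n + 1) p := mem_markerSet.mpr ⟨by omega, h2', h3, h4, h5⟩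
    simp [he] at this
  · rintro rfl
    exact ⟨le_refl _, hc, h0, hd, h2⟩

lemma loopA_length (begin end_ i : Int) (ans : List Int) :
    (loopA begin end_ i ans).length = ans.length := by
  fun_induction loopA with
  | case1 => rfl
  | case2 i ans h1 h2 h3 ih => exact ih
  | case3 i ans h1 h2 h3 ih => rw [ih, markA_length]
  | case4 => rfl

lemma ceil_facts (s i : Int) (hi : 1 ≤ i) :
    i ∣ PySem.Int.floordiv (s + i - 1) i * i ∧
    s ≤ PySem.Int.floordiv (s + i - 1) i * i ∧
    PySem.Int.floordiv (s + i - 1) i * i < s + i := by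
  rw [PySem.Int.floordiv_eq_ediv_of_pos (show (0:Int) < i by omega)]
  refine ⟨Dvd.intro_left _ rfl, ?_, ?_⟩
  · have h1 := Int.lt_ediv_add_one_mul_self (s + i - 1) (show 0 < i by omega)
    nlinarith
  · have h2 := Int.ediv_mul_le (s + i - 1) (b := i)
    omega

lemma loopA_getD (begin end_ i : Int) (ans : List Int) (hi : 1 ≤ i)
    (j : ℕ) (hj : j < ans.length) (hpe : begin + (j : Int) ≤ end_) :
    (loopA begin end_ i ans).getD j 0 =
      if (markerSet i.toNat (begin + j)).Nonempty
      then (((markerSet i.toNat (begin + j)).sup id : ℕ) : Int)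
      else ans.getD j 0 := by
  fun_induction loopA with
  | case1 i ans h1 h2 =>
    -- break: i * 2 > end_, so no marker ≥ i exists
    rw [if_neg]
    rintro ⟨d, hd⟩
    rw [mem_markerSet] at hd
    have : (i.toNat : Int) ≤ (d : Int) := by exact_mod_cast Nat.cast_le.mpr hd.1
    omega
  | case2 i ans h1 h2 h3 ih =>
    -- continue: max (i*2) begin > end_, i is not a marker for p = begin + j
    have hstep : markerSet i.toNat (begin + j) = markerSet (i.toNat + 1) (begin + j) := by
      apply markerSet_eq_succ
      rintro ⟨-, -, hle⟩
      have hcast : ((i.toNat : ℕ) : Int) = i := Int.toNat_of_nonneg (by omega)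
      rw [hcast] at hle
      omega
    have h1' : (i + 1).toNat = i.toNat + 1 := by omega
    rw [hstep, ← h1']
    exact ih (by omega) hj
  | case3 i ans h1 h2 h3 ih =>
    have hic : ((i.toNat : ℕ) : Int) = i := Int.toNat_of_nonneg (by omega)
    set s := max (i * 2) begin with hs
    set pos := PySem.Int.floordiv (s + i - 1) i * i with hpos
    obtain ⟨hdvd, hge, hlt⟩ := ceil_facts s i hi
    have hpb : begin ≤ pos := le_trans (le_max_right _ _) hge
    have h1' : (i + 1).toNat = i.toNat + 1 := by omega
    rw [ih (by omega) (by rw [markA_length]; exact hj), h1']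
    rw [markA_getD _ _ _ _ _ hi hpb j hj]
    set p := begin + (j : Int) with hp
    -- the mark condition at p is exactly "i marks p"
    have hmark : (pos ≤ p ∧ p ≤ end_ ∧ i ∣ (p - pos)) ↔ ((i : Int) ∣ p ∧ 2 * i ≤ p) := by
      constructor
      · rintro ⟨ha, hb, hc⟩
        refine ⟨?_, ?_⟩
        · have hsum := dvd_add hc hdvd
          rwa [sub_add_cancel] at hsum
        · omega
      · rintro ⟨ha, hb⟩
        have hsle : s ≤ p := by omega
        have hdp : i ∣ (p - pos) := dvd_sub ha hdvd
        refine ⟨?_, hpe, hdp⟩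
        -- p ≥ s > pos - i and i ∣ (p - pos) ⇒ pos ≤ p
        by_contra hlt'
        push_neg at hlt'
        obtain ⟨c, hc⟩ := hdp
        have hneg : p - pos < 0 := by omega
        have hgt : p - pos > -i := by omega
        have : c = 0 ∨ c ≤ -1 ∨ 1 ≤ c := by omega
        rcases this with rfl | hcl | hcg
        · simp at hc; omega
        · have : i * c ≤ -i := by nlinarith
          omega
        · have : i ≤ i * c := by nlinarith
          omega
    by_cases hne : (markerSet (i.toNat + 1) p).Nonempty
    · have hne0 : (markerSet i.toNat p).Nonempty :=
        ⟨hne.choose, markerSet_subset i.toNat p hne.choose_spec⟩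
      rw [if_pos hne, if_pos hne0, markerSet_sup_succ i.toNat p hne]
    · rw [if_neg hne]
      rw [Finset.not_nonempty_iff_eq_empty] at hne
      by_cases hm : (i : Int) ∣ p ∧ 2 * i ≤ p
      · rw [if_pos (hmark.mpr hm)]
        have hsing : markerSet i.toNat p = {i.toNat} := by
          apply markerSet_singleton _ _ (by omega) (by omega) _ _ hne
          · rw [hic]; exact hm.1
          · rw [hic]; exact hm.2
        rw [if_pos (by rw [hsing]; exact ⟨i.toNat, Finset.mem_singleton_self _⟩)]
        rw [hsing]
        simp [hic]
      · rw [if_neg (fun hP => hm (hmark.mp hP))]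
        have : markerSet i.toNat p = markerSet (i.toNat + 1) p := by
          apply markerSet_eq_succ
          rintro ⟨-, hd, hle⟩
          rw [hic] at hd hle
          exact hm ⟨hd, hle⟩
        rw [if_neg (by rw [this, hne]; simp)]
  | case4 i ans h1 =>
    rw [if_neg]
    rintro ⟨d, hd⟩
    rw [mem_markerSet] at hd
    omega

def gold (p : Int) : Int := (((markerSet 1 p).sup id : ℕ) : Int)

lemma solution_getD (begin end_ : Int) (j : ℕ) (hj : j < (end_ - begin + 1).toNat) :
    (solution begin end_).getD j 0 = gold (begin + j) := by
  unfold solution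
  rw [loopA_getD begin end_ 1 _ (by omega) j (by simpa using hj) (by omega)]
  have h1 : (1 : Int).toNat = 1 := rfl
  rw [h1]
  by_cases hne : (markerSet 1 (begin + j)).Nonempty
  · rw [if_pos hne]; rfl
  · rw [if_neg hne]
    rw [Finset.not_nonempty_iff_eq_empty] at hne
    rw [gold, hne]
    simp [List.getD_eq_getElem _ _ (show j < (List.replicate (end_ - begin + 1).toNat (0:Int)).length by simpa using hj)]

lemma gold_eq_of (p r : Int) (hr : 1 ≤ r) (hrd : r ∣ p) (hr2 : 2 * r ≤ p) (hrc : r ≤ 10000000)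
    (hmax : ∀ d : Int, 1 ≤ d → d ∣ p → 2 * d ≤ p → d ≤ 10000000 → d ≤ r) : gold p = r := by
  have hcast : ((r.toNat : ℕ) : Int) = r := Int.toNat_of_nonneg (by omega)
  have hmem : r.toNat ∈ markerSet 1 p := by
    rw [mem_markerSet]
    refine ⟨by omega, by omega, by omega, by rwa [hcast], by rwa [hcast]⟩
  have hub : (markerSet 1 p).sup id ≤ r.toNat := by
    apply Finset.sup_le
    intro d hd
    rw [mem_markerSet] at hd
    have := hmax (d : Int) (by exact_mod_cast hd.2.2.1) hd.2.2.2.1 hd.2.2.2.2 (by exact_mod_cast hd.2.1)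
    simp only [id]
    omega
  have hlb := Finset.le_sup (f := id) hmem
  simp only [id] at hlb hub
  rw [gold]
  omega

lemma bestLoop_eq (p k best : Int) (hp2 : 2 ≤ p) (hp14 : p ≤ 100000000000000) (hk : 2 ≤ k)
    (hb1 : 1 ≤ best) (hbk : best < k) (hbd : best ∣ p) (hbb : best * best ≤ p)
    (hbmax : ∀ d : Int, 1 ≤ d → d < k → d ∣ p → d ≤ best)
    (hcof : ∀ d e : Int, 2 ≤ d → d < k → d * e = p → 10000000 < e) :
    bestLoop p k best = gold p := by
  induction hfuel : (p - k).toNat using Nat.strong_induction_on generalizing k best with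
  | _ n IH =>
  subst hfuel
  rw [bestLoop]
  by_cases h : k * k ≤ p ∧ 2 ≤ k
  · rw [dif_pos h]
    have hkp : k < p := by nlinarith [h.1, h.2]
    by_cases hdvd : PySem.Int.mod p k = 0
    · rw [if_pos hdvd]
      rw [PySem.Int.mod_eq_zero_iff_dvd] at hdvd
      have hq : PySem.Int.floordiv p k = p / k :=
        PySem.Int.floordiv_eq_ediv_of_pos (show (0:Int) < k by omega)
      have hqk : p / k * k = p := Int.ediv_mul_cancel hdvd
      set q := p / k with hqdef
      have hq1 : 1 ≤ q := by nlinarith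
      by_cases hcap : PySem.Int.floordiv p k ≤ 10000000
      · rw [if_pos hcap]
        rw [hq] at hcap ⊢
        symm
        apply gold_eq_of p q hq1 (Dvd.intro k (by linarith [hqk])) (by nlinarith [h.1, h.2]) hcap
        intro d hd1 hdd hd2 hdc
        obtain ⟨e, he⟩ := hdd
        have he2 : 2 ≤ e := by nlinarith
        by_cases hek : e < k
        · exact absurd (hcof e d he2 hek (by linarith [he])) (by omega)
        · push_neg at hek
          nlinarith
      · rw [if_neg hcap]
        rw [hq] at hcap
        push_neg at hcap
        apply IH (p - (k + 1)).toNat (by omega) (k + 1) k (by omega) (by omega) (by omega) hdvd h.1 _ _ rfl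
        · intro d hd1 hdk hdd
          omega
        · intro d e hd2 hdk hde
          by_cases hdk' : d < k
          · exact hcof d e hd2 hdk' hde
          · have hdek : d = k := by omega
            subst hdek
            have : e = q := by
              have : d * e = d * q := by rw [hde]; nlinarith [hqk]
              exact mul_left_cancel₀ (by omega) this
            omega
    · rw [if_neg hdvd]
      rw [PySem.Int.mod_eq_zero_iff_dvd] at hdvd
      apply IH (p - (k + 1)).toNat (by omega) (k + 1) best (by omega) hb1 (by omega) hbd hbb _ _ rfl
      · intro d hd1 hdk hdd
        by_cases hdk' : d < k
        · exact hbmax d hd1 hdk' hdd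
        · have hdk2 : d = k := by omega
          subst hdk2
          exact absurd hdd hdvd
      · intro d e hd2 hdk hde
        by_cases hdk' : d < k
        · exact hcof d e hd2 hdk' hde
        · have hdk2 : d = k := by omega
          subst hdk2
          exact absurd ⟨e, hde.symm⟩ hdvd
  · rw [dif_neg h]
    have hkk : p < k * k := by
      rcases not_and_or.mp h with h' | h'
      · omega
      · omega
    symm
    apply gold_eq_of p best hb1 hbd
    · rcases eq_or_lt_of_le hb1 with hb | hb
      · omega
      · nlinarith
    · nlinarith
    · intro d hd1 hdd hd2 hdc
      by_cases hdk : d < k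
      · exact hbmax d hd1 hdk hdd
      · push_neg at hdk
        obtain ⟨e, he⟩ := hdd
        have he2 : 2 ≤ e := by nlinarith
        have hek : e < k := by nlinarith
        exact absurd (hcof e d he2 hek (by linarith [he])) (by omega)

lemma bestDiv_eq_gold (p : Int) (hp14 : p ≤ 100000000000000) : bestDiv p = gold p := by
  rw [bestDiv]
  by_cases hp : p < 2
  · rw [if_pos hp]
    have : markerSet 1 p = ∅ := by
      rw [Finset.eq_empty_iff_forall_notMem]
      intro d hd
      rw [mem_markerSet] at hd
      have : (1 : Int) ≤ (d : Int) := by exact_mod_cast hd.2.2.1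
      omega
    rw [gold, this]
    simp
  · rw [if_neg hp]
    push_neg at hp
    apply bestLoop_eq p 2 1 hp hp14 (by omega) (by omega) (by omega) (one_dvd p) (by omega)
    · intro d hd1 hdk hdd
      omega
    · intro d e hd2 hdk hde
      omega

lemma solution_length (begin end_ : Int) :
    (solution begin end_).length = (end_ - begin + 1).toNat := by
  unfold solution
  rw [loopA_length]
  simp

lemma solution_alt_getD (begin end_ : Int) (j : ℕ) (hj : j < (end_ + 1 - begin).toNat) :
    (solution_alt begin end_).getD j 0 = bestDiv (begin + j) := by
  unfold solution_alt
  have hlen : j < ((PySem.List.pyRange begin (end_ + 1) 1).map bestDiv).length := by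
    simpa [PySem.List.length_pyRange_one] using hj
  rw [List.getD_eq_getElem _ _ hlen]
  rw [List.getElem_map]
  congr 1
  exact PySem.List.getElem_pyRange_one _ _ _ _

-- ===== VERDICT (by name: the statement is the Claim_ definition above) =====
theorem solution_spec : Claim_equal_solution := by
  intro begin end_ hdom
  unfold Spec_solution
  simp only [Dom_solution, pvDomInt, Bool.and_eq_true, decide_eq_true_eq] at hdom
  apply List.ext_getElem
  · rw [solution_length]
    simp [solution_alt, PySem.List.length_pyRange_one]
    omega
  · intro j h1 h2
    rw [← List.getD_eq_getElem _ 0 h1, ← List.getD_eq_getElem _ 0 h2]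
    rw [solution_length] at h1
    rw [solution_getD begin end_ j h1]
    rw [solution_alt_getD begin end_ j (by omega)]
    rw [bestDiv_eq_gold _ (by omega)]
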